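-- pv_equiv track=rewrite | github.com/hoehlenwolf/AdventOfCode | aoc_2019/code/day04.py | check_a
-- ===== SOURCE A (Python) =====
-- def check_a(number: int) -> bool:
--     """Checks if a number is valid for Part A"""
--     number_str = str(number)
--     prev = ""
--     for digit in number_str:
--         # at least 2 adjacent numbers have to be same
--         if digit == prev:
--             return True
--         prev = digit
--     return False
-- ===== SOURCE B (Python) =====
-- def check_a(number: int) -> bool:
--     """Checks if a number is valid for Part A"""
--     s = str(number)
--     runs = []
--     while s:
--         run = len(s) - len(s.lstrip(s[0]))
--         runs.append(run)
--         s = s[run:]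
--     return any(run >= 2 for run in runs)
-- ===== Notes on version B (the rewrite author's own statement) =====
-- stated objective: idiomatic
-- what changed: A compares each digit to the previous one with an early return; B first decomposes the digit string into maximal run lengths of equal characters (repeatedly stripping the leading run) and then checks whether any run length is at least 2.
import Mathlib
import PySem

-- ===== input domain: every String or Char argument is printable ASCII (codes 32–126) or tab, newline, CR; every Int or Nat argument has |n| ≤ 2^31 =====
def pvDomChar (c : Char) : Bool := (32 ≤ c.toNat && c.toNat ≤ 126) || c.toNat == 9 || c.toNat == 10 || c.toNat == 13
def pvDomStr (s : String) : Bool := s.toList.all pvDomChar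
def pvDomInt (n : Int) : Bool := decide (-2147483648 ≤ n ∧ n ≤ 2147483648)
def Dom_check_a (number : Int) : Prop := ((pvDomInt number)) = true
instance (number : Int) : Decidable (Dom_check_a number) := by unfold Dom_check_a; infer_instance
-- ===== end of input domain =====

-- B replaces A's previous-digit comparison loop by a run-length decomposition of the
-- digit string (maximal runs of equal characters, then any run length ≥ 2); same O(n) cost.


-- ===== PORT A =====
-- A's loop: prev starts as "" (no previous digit → Option Char, none), early return on match
def checkALoop : List Char → Option Char → Bool
  | [], _ => false
  | d :: rest, prev => if some d = prev then true else checkALoop rest (some d)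

def check_a (number : Int) : Bool :=
  checkALoop (PySem.Int.toStr number).toList none

-- ===== PORT B =====
-- B's while loop: peel off the maximal leading run (len(s) - len(s.lstrip(s[0])) = takeWhile,
-- s[run:] = dropWhile), collecting run lengths
def runLengths : List Char → List Nat
  | [] => []
  | c :: cs =>
    ((c :: cs).takeWhile (· == c)).length :: runLengths ((c :: cs).dropWhile (· == c))
  termination_by l => l.length
  decreasing_by
    simp only [List.dropWhile_cons, BEq.rfl, if_true, List.length_cons]
    exact Nat.lt_succ_of_le (List.length_dropWhile_le _ cs)

def check_a_alt (number : Int) : Bool :=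
  (runLengths (PySem.Int.toStr number).toList).any (fun run => decide (2 ≤ run))

-- ===== PRECONDITION & SPEC =====
def Spec_check_a (number : Int) (out : Bool) : Prop := out = check_a_alt number
instance (number : Int) (out : Bool) : Decidable (Spec_check_a number out) := by unfold Spec_check_a; infer_instance

-- ===== CLAIM (what is proved, stated in full; the proofs are below) =====
def Claim_equal_check_a : Prop := ∀ (number : Int), Dom_check_a number → Spec_check_a number (check_a number)

-- ===== LEMMAS AND PROOFS =====

theorem runLengths_nil : runLengths [] = [] := by rw [runLengths.eq_def]

theorem runLengths_cons (c : Char) (cs : List Char) :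
    runLengths (c :: cs) =
      ((cs.takeWhile (· == c)).length + 1) :: runLengths (cs.dropWhile (· == c)) := by
  rw [runLengths.eq_def]
  simp

theorem checkALoop_eq_runs (l : List Char) :
    checkALoop l none = (runLengths l).any (fun run => decide (2 ≤ run)) := by
  induction hn : l.length using Nat.strong_induction_on generalizing l with
  | _ n IH =>
  match l with
  | [] => simp [checkALoop, runLengths_nil]
  | [c] =>
    simp [checkALoop, runLengths_cons, runLengths_nil, List.takeWhile_nil]
  | c :: d :: cs =>
    by_cases h : d = c
    · subst h
      simp [checkALoop, runLengths_cons]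
    · have hbeq : (d == c) = false := by simpa using h
      have hrest : checkALoop (d :: cs) none =
          (runLengths (d :: cs)).any (fun run => decide (2 ≤ run)) := by
        subst hn
        exact IH (d :: cs).length (by simp) _ rfl
      simp only [checkALoop, Option.some_inj, if_neg h] at hrest ⊢
      rw [runLengths_cons]
      simp only [List.takeWhile_cons, hbeq, List.dropWhile_cons, List.any_cons]
      simpa using hrest

-- ===== VERDICT (by name: the statement is the Claim_ definition above) =====
theorem check_a_spec : Claim_equal_check_a := by
  intro number _
  unfold Spec_check_a check_a check_a_alt
  exact checkALoop_eq_runs _
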